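-- pv_equiv track=rewrite | github.com/hopexxf/3gpp_rag | src/search.py | build_hierarchy_path
-- ===== SOURCE A (Python) =====
-- def get_parent_clause_number(clause):
--     """Get parent clause number. E.g. 5.1.3 -> 5.1, 5.1 -> 5, 5 -> None"""
--     parts = clause.split('.')
--     if len(parts) <= 1:
--         return None
--     return '.'.join(parts[:-1])
--
-- def build_hierarchy_path(clause, title_lookup, spec):
--     """Build full hierarchy path for a clause within the same spec.
--     E.g. 5.1.3 -> "5 | 5.1 Random Access procedure | 5.1.3 ..."
--     """
--     path_parts = []
--     current = clause
--     visited = set()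
--     while current and current not in visited:
--         visited.add(current)
--         info = title_lookup.get((spec, current))
--         if info:
--             label = f"{current} {info['title']}" if info['title'] else current
--         else:
--             label = current
--         path_parts.insert(0, label)
--         current = get_parent_clause_number(current)
--         # Max 5 levels up
--         if len(path_parts) >= 5:
--             break
--     return " > ".join(path_parts) if path_parts else clause
-- ===== SOURCE B (Python) =====
-- def _label(p, title_lookup, spec):
--     info = title_lookup.get((spec, p))
--     if info and info['title']:
--         return f"{p} {info['title']}"
--     return p
--
-- def build_hierarchy_path(clause, title_lookup, spec):
--     parts = clause.split('.')
--     prefixes = ['.'.join(parts[:i]) for i in range(1, len(parts) + 1)]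
--     deepest = [p for p in prefixes if p][-5:]
--     labels = [_label(p, title_lookup, spec) for p in deepest]
--     return ' > '.join(labels) if labels else clause
-- ===== Notes on version B (the rewrite author's own statement) =====
-- stated objective: simpler
-- what changed: Replaces the walk-up while-loop with mutable state (visited set, repeated re-split of each parent, insert(0) into the front of the list, break at 5) by a forward construction: split once, build all dotted prefixes by comprehension, keep the deepest five with [-5:], map to labels and join.
import Mathlib
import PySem

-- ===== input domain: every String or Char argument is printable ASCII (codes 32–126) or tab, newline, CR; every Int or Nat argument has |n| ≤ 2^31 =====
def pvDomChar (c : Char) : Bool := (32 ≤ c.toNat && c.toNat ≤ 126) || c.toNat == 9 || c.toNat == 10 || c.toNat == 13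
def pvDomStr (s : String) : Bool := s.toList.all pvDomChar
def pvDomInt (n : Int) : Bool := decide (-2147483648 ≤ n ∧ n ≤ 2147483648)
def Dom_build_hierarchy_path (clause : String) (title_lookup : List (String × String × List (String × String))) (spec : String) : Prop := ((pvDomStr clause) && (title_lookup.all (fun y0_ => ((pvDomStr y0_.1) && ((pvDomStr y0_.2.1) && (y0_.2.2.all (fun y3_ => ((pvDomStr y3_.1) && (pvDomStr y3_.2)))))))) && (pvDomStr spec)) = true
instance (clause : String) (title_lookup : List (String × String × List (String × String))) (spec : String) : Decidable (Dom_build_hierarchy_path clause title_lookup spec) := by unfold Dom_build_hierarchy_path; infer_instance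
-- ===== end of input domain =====

-- B rebuilds the hierarchy forward (split once, all dotted prefixes by comprehension, deepest five, label, join)
-- instead of A's walk-up loop with a visited set, repeated re-splitting and insert(0); objective: simpler.

-- shared helpers: both Pythons contain these very expressions
-- (title_lookup.get((spec, current)): first entry whose key pair matches — Python dict keys are unique)
def pvLookup (title_lookup : List (String × String × List (String × String))) (spec c : String) : Option (List (String × String)) :=
  (title_lookup.find? (fun e => e.1 == spec && e.2.1 == c)).map (·.2.2)

-- the label expression of both Pythons: `f"{c} {info['title']}" if info['title'] else c` when info is truthy
-- (info['title'] is the first "title" entry; where Python raises KeyError — "title" absent in a truthy info —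
-- Pre_ excludes the input and this helper falls back to c)
def pvLabel (title_lookup : List (String × String × List (String × String))) (spec c : String) : String :=
  match pvLookup title_lookup spec c with
  | none => c
  | some info =>
    if info.isEmpty then c            -- empty dict is falsy in Python: `if info:` fails
    else match (info.find? (fun kv => kv.1 == "title")).map (·.2) with
      | some t => if t = "" then c else String.ofList (c.toList ++ ' ' :: t.toList)  -- f"{c} {t}", exact
      | none => c                     -- Python raises KeyError here; outside Pre_

-- ===== PORT A =====
def get_parent_clause_number (clause : String) : Option String :=
  let parts := (PySem.Str.split? clause ".").getD []    -- sep "." ≠ "", split? is always some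
  if parts.length ≤ 1 then none
  else some (PySem.Str.join "." (PySem.List.slice parts none (some (-1))))   -- '.'.join(parts[:-1])

def pvLoopA (title_lookup : List (String × String × List (String × String))) (spec : String)
    (current : Option String) (visited : List String) (acc : List String) : List String :=
  match current with
  | none => acc                                          -- `while current` fails (None)
  | some c =>
    if c == "" || visited.contains c then acc            -- `while current and current not in visited` fails
    else
      let visited' := PySem.Set.add visited c
      let acc' := pvLabel title_lookup spec c :: acc     -- path_parts.insert(0, label)
      if h5 : 5 ≤ acc'.length then acc'                   -- max 5 levels: break
      else pvLoopA title_lookup spec (get_parent_clause_number c) visited' acc'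
termination_by 5 - acc.length
decreasing_by simp only [acc', List.length_cons] at h5 ⊢; omega

def build_hierarchy_path (clause : String) (title_lookup : List (String × String × List (String × String))) (spec : String) : String :=
  let path_parts := pvLoopA title_lookup spec (some clause) PySem.Set.empty []
  if path_parts.isEmpty then clause
  else PySem.Str.join " > " path_parts

-- ===== PORT B =====
def build_hierarchy_path_alt (clause : String) (title_lookup : List (String × String × List (String × String))) (spec : String) : String :=
  let parts := (PySem.Str.split? clause ".").getD []                 -- clause.split('.')
  let prefixes := (PySem.List.pyRange 1 ((parts.length : Int) + 1) 1).map
      (fun i => PySem.Str.join "." (PySem.List.slice parts none (some i)))   -- '.'.join(parts[:i]) for i in range(1, len+1)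
  let deepest := PySem.List.slice (prefixes.filter (fun p => p != "")) (some (-5)) none  -- [p for p in prefixes if p][-5:]
  let labels := deepest.map (fun p => pvLabel title_lookup spec p)
  if labels.isEmpty then clause
  else PySem.Str.join " > " labels

-- ===== PRECONDITION & SPEC =====
-- the prefixes of clause that the Python actually consults: the deepest five non-empty dotted prefixes
def pvConsulted (clause : String) : List String :=
  let parts := (PySem.Str.split? clause ".").getD []
  let ne := ((List.range parts.length).map (fun i => PySem.Str.join "." (parts.take (i+1)))).filter (fun p => p != "")
  ne.drop (ne.length - 5)

def pvTitleOk (info? : Option (List (String × String))) : Bool :=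
  match info? with
  | none => true
  | some info => info.isEmpty || ((info.find? (fun kv => kv.1 == "title")).isSome)

-- Pre_ excludes exactly the inputs on which Python A raises KeyError: a consulted prefix whose
-- (non-empty) info dict has no 'title' key. A returns no value there (and B raises identically).
def Pre_build_hierarchy_path (clause : String) (title_lookup : List (String × String × List (String × String))) (spec : String) : Prop :=
  ∀ p ∈ pvConsulted clause, pvTitleOk (pvLookup title_lookup spec p) = true
instance (clause : String) (title_lookup : List (String × String × List (String × String))) (spec : String) : Decidable (Pre_build_hierarchy_path clause title_lookup spec) := by unfold Pre_build_hierarchy_path; infer_instance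

def pvWitness_build_hierarchy_path : String × (List (String × String × List (String × String))) × String :=
  ("1.2.3", [("S", ("1.2", [("title", "Intro")]))], "S")

def Spec_build_hierarchy_path (clause : String) (title_lookup : List (String × String × List (String × String))) (spec : String) (out : String) : Prop := out = build_hierarchy_path_alt clause title_lookup spec
instance (clause : String) (title_lookup : List (String × String × List (String × String))) (spec : String) (out : String) : Decidable (Spec_build_hierarchy_path clause title_lookup spec out) := by unfold Spec_build_hierarchy_path; infer_instance

-- ===== CLAIM (what is proved, stated in full; the proofs are below) =====
def Claim_equal_build_hierarchy_path : Prop := ∀ (clause : String) (title_lookup : List (String × String × List (String × String))) (spec : String), Dom_build_hierarchy_path clause title_lookup spec → Pre_build_hierarchy_path clause title_lookup spec → Spec_build_hierarchy_path clause title_lookup spec (build_hierarchy_path clause title_lookup spec)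

-- ===== LEMMAS AND PROOFS =====
-- ---- splitOn bridge: PySem's fuelled splitter is List.splitOn for a one-char separator ----
theorem pvSplitOnP_ne_nil {α : Type} (p : α → Bool) (l : List α) : List.splitOnP p l ≠ [] := by
  induction l with
  | nil => simp [List.splitOnP_nil]
  | cons x xs ih =>
    rw [List.splitOnP_cons]
    split
    · simp
    · cases h : List.splitOnP p xs with
      | nil => exact absurd h ih
      | cons a as => simp [h]

theorem pvModifyHead_fun_id {α : Type} (l : List (List α)) : List.modifyHead (fun x => x) l = l := by
  cases l <;> simp

theorem pvGo_eq (d : Char) : ∀ (fuel : Nat) (l cur : List Char) (acc : List (List Char)),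
    l.length < fuel →
    PySem.Chars.splitOn.go [d] fuel l cur acc
      = acc.reverse ++ (List.splitOnP (· == d) l).modifyHead (cur.reverse ++ ·) := by
  intro fuel
  induction fuel with
  | zero => intro l cur acc h; omega
  | succ n ih =>
    intro l cur acc h
    cases l with
    | nil =>
      simp [PySem.Chars.splitOn.go, List.splitOnP_nil]
    | cons c rest =>
      rw [PySem.Chars.splitOn.go]
      by_cases hc : c = d
      · subst hc
        simp only [List.isPrefixOf, BEq.rfl, Bool.true_and, if_pos]
        rw [ih _ _ _ (by simpa using Nat.lt_of_succ_lt_succ (by simpa using h))]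
        simp [List.splitOnP_cons, pvModifyHead_fun_id]
      · have hpre : List.isPrefixOf [d] (c :: rest) = false := by
          simp [List.isPrefixOf]; intro hdc; exact absurd hdc.symm hc
        rw [hpre]
        simp only [Bool.false_eq_true, if_false]
        rw [ih _ _ _ (by simpa using Nat.lt_of_succ_lt_succ (by simpa using h))]
        rw [List.splitOnP_cons]
        simp only [show (c == d) = false by simpa using hc, Bool.false_eq_true, if_false]
        cases hsp : List.splitOnP (· == d) rest with
        | nil => exact absurd hsp (pvSplitOnP_ne_nil _ _)
        | cons a as => simp

theorem pvChars_splitOn_single (l : List Char) (d : Char) :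
    PySem.Chars.splitOn l [d] = List.splitOn d l := by
  rw [PySem.Chars.splitOn, pvGo_eq d _ _ _ _ (by omega)]
  simp [List.splitOn, pvModifyHead_fun_id]

theorem pvStr_split_dot (s : String) :
    (PySem.Str.split? s ".").getD [] = (List.splitOn '.' s.toList).map String.ofList := by
  simp [PySem.Str.split?, PySem.Chars.split?, pvChars_splitOn_single]

theorem pvSplitOn_free (d : Char) (l : List Char) : ∀ t ∈ List.splitOn d l, d ∉ t := by
  have : ∀ t ∈ List.splitOnP (· == d) l, d ∉ t := by
    induction l with
    | nil => simp [List.splitOnP_nil]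
    | cons x xs ih =>
      rw [List.splitOnP_cons]
      by_cases hx : x = d
      · subst hx; simp only [BEq.rfl, if_pos]
        intro t ht
        rcases List.mem_cons.mp ht with h | h
        · subst h; simp
        · exact ih t h
      · simp only [show (x == d) = false by simpa using hx, Bool.false_eq_true, if_false]
        cases hsp : List.splitOnP (· == d) xs with
        | nil => exact absurd hsp (pvSplitOnP_ne_nil _ _)
        | cons a as =>
          intro t ht
          rcases List.mem_cons.mp ht with h | h
          · subst h
            intro hd
            rcases List.mem_cons.mp hd with h | h
            · exact hx h.symm
            · exact ih a (by rw [hsp]; exact List.mem_cons_self) h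
          · exact ih t (by rw [hsp]; exact List.mem_cons.mpr (Or.inr h))
  simpa [List.splitOn] using this

theorem pvSplitOn_ne_nil (d : Char) (l : List Char) : List.splitOn d l ≠ [] := by
  simpa [List.splitOn] using pvSplitOnP_ne_nil (· == d) l

-- ---- dotted joins ----
def pvI (ls : List (List Char)) : List Char := ['.'].intercalate ls

theorem pvI_eq_join (ls : List (List Char)) : pvI ls = PySem.Chars.join ['.'] ls := rfl
theorem pvI_singleton (a : List Char) : pvI [a] = a := by
  rw [pvI_eq_join, PySem.Chars.join_singleton]
theorem pvI_cons_cons (a b : List Char) (r : List (List Char)) :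
    pvI (a :: b :: r) = a ++ '.' :: pvI (b :: r) := by
  rw [pvI_eq_join, PySem.Chars.join_cons_cons, pvI_eq_join]
  simp

theorem pvI_append_singleton (l : List (List Char)) (x : List Char) (h : l ≠ []) :
    pvI (l ++ [x]) = pvI l ++ '.' :: x := by
  induction l with
  | nil => exact absurd rfl h
  | cons a r ih =>
    cases r with
    | nil => simp [pvI_cons_cons, pvI_singleton]
    | cons b r' =>
      have h1 : pvI (a :: (b :: r' ++ [x])) = a ++ '.' :: pvI (b :: r' ++ [x]) := by
        rw [show (b :: r' ++ [x]) = b :: (r' ++ [x]) from rfl, pvI_cons_cons]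
      rw [show (a :: (b :: r') ++ [x]) = a :: (b :: r' ++ [x]) from rfl, h1, pvI_cons_cons,
        ih (by simp)]
      simp

theorem pvTake_ne_nil {α : Type} (cs : List α) (k : Nat) (h1 : 1 ≤ k) (hne : cs ≠ []) :
    cs.take k ≠ [] := by
  rw [Ne, List.take_eq_nil_iff]
  rintro (h | h)
  · omega
  · exact hne h

def pvPS (l : List String) : String := PySem.Str.join "." l

theorem pvPS_toList (l : List String) : (pvPS l).toList = pvI (l.map String.toList) := by
  simp [pvPS, PySem.Str.toList_join]; rfl

def pvPk (cs : List (List Char)) (k : Nat) : String := pvPS ((cs.map String.ofList).take k)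

theorem pvPk_toList (cs : List (List Char)) (k : Nat) :
    (pvPk cs k).toList = pvI (cs.take k) := by
  rw [pvPk, pvPS_toList, ← List.map_take, List.map_map]
  congr 1
  simp [Function.comp_def]

theorem pvI_take_len_lt (cs : List (List Char)) (k : Nat)
    (h1 : 1 ≤ k) (hk : k < cs.length) :
    (pvI (cs.take k)).length < (pvI (cs.take (k+1))).length := by
  have hget : cs[k]? = some cs[k] := List.getElem?_eq_getElem hk
  have : cs.take (k+1) = cs.take k ++ [cs[k]] := by
    rw [List.take_add_one, hget]; rfl
  rw [this, pvI_append_singleton _ _ (pvTake_ne_nil _ _ h1 (List.ne_nil_of_length_pos (by omega)))]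
  simp

theorem pvI_take_len_mono (cs : List (List Char)) (j k : Nat)
    (h1 : 1 ≤ j) (hjk : j < k) (hk : k ≤ cs.length) :
    (pvI (cs.take j)).length < (pvI (cs.take k)).length := by
  induction k with
  | zero => omega
  | succ m ih =>
    by_cases hm : j < m
    · exact lt_trans (ih hm (by omega)) (pvI_take_len_lt cs m (by omega) (by omega))
    · have : j = m := by omega
      subst this
      exact pvI_take_len_lt cs j h1 (by omega)

theorem pvPk_ne_empty (cs : List (List Char)) (k : Nat)
    (h2 : 2 ≤ k) (hk : k ≤ cs.length) : pvPk cs k ≠ "" := by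
  intro h
  have ht : (pvPk cs k).toList = [] := by rw [h]; rfl
  rw [pvPk_toList] at ht
  have : 2 ≤ (cs.take k).length := by simp; omega
  obtain ⟨a, r, har⟩ := List.exists_cons_of_ne_nil (l := cs.take k) (by intro hx; rw [hx] at this; simp at this)
  obtain ⟨b, r', hbr⟩ := List.exists_cons_of_ne_nil (l := r) (by intro hx; rw [har, hx] at this; simp at this)
  rw [har, hbr, pvI_cons_cons] at ht
  simp at ht

-- ---- the split of a dotted prefix recovers the prefix of the parts ----
theorem pvSplit_Pk (cs : List (List Char)) (hfree : ∀ t ∈ cs, '.' ∉ t) (k : Nat)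
    (h1 : 1 ≤ k) (hk : k ≤ cs.length) :
    (PySem.Str.split? (pvPk cs k) ".").getD [] = (cs.map String.ofList).take k := by
  rw [pvStr_split_dot, pvPk_toList]
  have hne : cs.take k ≠ [] :=
    pvTake_ne_nil _ _ h1 (List.ne_nil_of_length_pos (by omega))
  have : List.splitOn '.' (pvI (cs.take k)) = cs.take k := by
    have := List.splitOn_intercalate (cs.take k) '.'
      (fun l hl => hfree l (List.mem_of_mem_take hl)) hne
    simpa [pvI] using this
  rw [this, List.map_take]

theorem pvParent_Pk (cs : List (List Char)) (hfree : ∀ t ∈ cs, '.' ∉ t) (k : Nat)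
    (h1 : 1 ≤ k) (hk : k ≤ cs.length) :
    get_parent_clause_number (pvPk cs k)
      = if k = 1 then none else some (pvPk cs (k-1)) := by
  rw [get_parent_clause_number]
  simp only [pvSplit_Pk cs hfree k h1 hk]
  have hlen : ((cs.map String.ofList).take k).length = k := by
    simp; omega
  by_cases hk1 : k = 1
  · subst hk1; simp [hlen]
  · have : ¬ ((cs.map String.ofList).take k).length ≤ 1 := by omega
    simp only [hlen, if_neg (by omega : ¬ k ≤ 1), if_neg hk1]
    rw [PySem.List.slice_to_neg_one]
    congr 1
    rw [pvPk, pvPS]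
    congr 1
    by_cases hkl : k < (cs.map String.ofList).length
    · rw [List.dropLast_take hkl]
    · have : k = (cs.map String.ofList).length := by simp at hkl ⊢; simp at hlen; omega
      rw [this, List.take_length, List.dropLast_eq_take, ← this]

-- ---- loop models ----
def pvDd (cs : List (List Char)) : Nat → List String
  | 0 => []
  | k+1 => if pvPk cs (k+1) = "" then [] else pvPk cs (k+1) :: pvDd cs k

def pvWalk (tl : List (String × String × List (String × String))) (spec : String) :
    List String → List String → List String
  | [], acc => acc
  | c :: rest, acc =>
    if 5 ≤ (pvLabel tl spec c :: acc).length then pvLabel tl spec c :: acc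
    else pvWalk tl spec rest (pvLabel tl spec c :: acc)

theorem pvWalk_eq (tl : List (String × String × List (String × String))) (spec : String) :
    ∀ (qs acc : List String), acc.length < 5 →
      pvWalk tl spec qs acc = ((qs.take (5 - acc.length)).map (pvLabel tl spec)).reverse ++ acc := by
  intro qs
  induction qs with
  | nil => intro acc h; simp [pvWalk]
  | cons c rest ih =>
    intro acc h
    rw [pvWalk]
    by_cases h5 : 5 ≤ (pvLabel tl spec c :: acc).length
    · rw [if_pos h5]
      have : 5 - acc.length = 1 := by simp at h5; omega
      simp [this]
    · rw [if_neg h5]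
      rw [ih _ (by simp at h5 ⊢; omega)]
      have : 5 - acc.length = (5 - (pvLabel tl spec c :: acc).length) + 1 := by
        simp at h5 ⊢; omega
      rw [this, List.take_succ_cons]
      simp

theorem pvLoopA_eq (tl : List (String × String × List (String × String))) (spec : String)
    (cs : List (List Char)) (hfree : ∀ t ∈ cs, '.' ∉ t) :
    ∀ (k : Nat), 1 ≤ k → k ≤ cs.length →
    ∀ (acc visited : List String), acc.length < 5 →
      (∀ v ∈ visited, (pvPk cs k).toList.length < v.toList.length) →
      pvLoopA tl spec (some (pvPk cs k)) visited acc = pvWalk tl spec (pvDd cs k) acc := by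
  intro k
  induction k with
  | zero => intro h; omega
  | succ m ih =>
    intro _ hk acc visited hacc hvis
    rw [pvLoopA]
    have hnotmem : visited.contains (pvPk cs (m+1)) = false := by
      rw [← Bool.not_eq_true, List.contains_iff_mem]
      intro hmem
      exact absurd rfl (Nat.ne_of_lt (hvis _ hmem))
    by_cases hemp : pvPk cs (m+1) = ""
    · have hm0 : m = 0 := by
        by_contra hm
        exact pvPk_ne_empty cs (m+1) (by omega) hk hemp
      subst hm0
      rw [show ((pvPk cs 1 == "") = true) from (beq_iff_eq.mpr hemp)]
      simp only [Bool.true_or, if_pos]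
      rw [pvDd, if_pos hemp, pvWalk]
    · rw [show ((pvPk cs (m+1) == "") = false) from (beq_eq_false_iff_ne.mpr hemp), hnotmem]
      simp only [Bool.or_self, Bool.false_eq_true, if_false]
      rw [pvDd, if_neg hemp, pvWalk]
      by_cases h5 : 5 ≤ (pvLabel tl spec (pvPk cs (m+1)) :: acc).length
      · rw [dif_pos h5, if_pos h5]
      · rw [dif_neg h5, if_neg h5]
        rw [pvParent_Pk cs hfree (m+1) (by omega) hk]
        by_cases hm1 : m + 1 = 1
        · have : m = 0 := by omega
          subst this
          rw [if_pos rfl, pvLoopA, pvDd, pvWalk]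
        · rw [if_neg hm1]
          have hm1' : 1 ≤ m := by omega
          have : m + 1 - 1 = m := by omega
          rw [this]
          rw [ih hm1' (by omega) _ _ (by simp at h5 ⊢; omega)]
          intro v hv
          rcases (PySem.Set.mem_add visited (pvPk cs (m+1)) v).mp hv with h | h
          · calc (pvPk cs m).toList.length
                < (pvPk cs (m+1)).toList.length := by
                  rw [pvPk_toList, pvPk_toList]
                  exact pvI_take_len_mono cs m (m+1) hm1' (by omega) hk
              _ < v.toList.length := hvis v h
          · subst h
            rw [pvPk_toList, pvPk_toList]
            exact pvI_take_len_mono cs m (m+1) hm1' (by omega) hk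

theorem pvDd_reverse (cs : List (List Char)) :
    ∀ (k : Nat), k ≤ cs.length →
      (pvDd cs k).reverse
        = ((List.range k).map (fun j => pvPk cs (j+1))).filter (fun p => p != "") := by
  intro k
  induction k with
  | zero => intro _; simp [pvDd]
  | succ m ih =>
    intro hk
    rw [pvDd, List.range_succ, List.map_append, List.filter_append]
    by_cases hemp : pvPk cs (m+1) = ""
    · have hm0 : m = 0 := by
        by_contra hm
        exact pvPk_ne_empty cs (m+1) (by omega) hk hemp
      subst hm0
      rw [if_pos hemp]
      simp [hemp]
    · rw [if_neg hemp, List.reverse_cons, ih (by omega)]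
      simp [hemp]

theorem build_eq_general (clause : String)
    (tl : List (String × String × List (String × String))) (spec : String) :
    build_hierarchy_path clause tl spec = build_hierarchy_path_alt clause tl spec := by
  have hfree := pvSplitOn_free '.' clause.toList
  have hne := pvSplitOn_ne_nil '.' clause.toList
  set cs := List.splitOn '.' clause.toList with hcs
  have hn : 1 ≤ cs.length := List.length_pos_of_ne_nil hne
  have hclause : clause = pvPk cs cs.length := by
    rw [← String.toList_inj, pvPk_toList, List.take_length]
    have := List.intercalate_splitOn clause.toList '.'
    rw [← hcs] at this
    rw [pvI]
    exact this.symm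
  -- A side reduces to the walk over the descending non-empty prefixes
  have hA : build_hierarchy_path clause tl spec
      = (if (pvWalk tl spec (pvDd cs cs.length) []).isEmpty then clause
         else PySem.Str.join " > " (pvWalk tl spec (pvDd cs cs.length) [])) := by
    rw [build_hierarchy_path]
    rw [show (some clause) = some (pvPk cs cs.length) from by rw [← hclause]]
    rw [pvLoopA_eq tl spec cs hfree cs.length hn (le_refl _) [] PySem.Set.empty (by simp)
      (by intro v hv; simp [PySem.Set.empty] at hv)]
  -- B side reduces to the same list
  have hparts : (PySem.Str.split? clause ".").getD [] = cs.map String.ofList := by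
    rw [pvStr_split_dot, ← hcs]
  have hpref : (PySem.List.pyRange 1 (((cs.map String.ofList).length : Int) + 1) 1).map
        (fun i => PySem.Str.join "." (PySem.List.slice (cs.map String.ofList) none (some i)))
      = (List.range cs.length).map (fun j => pvPk cs (j+1)) := by
    rw [PySem.List.pyRange_one, List.map_map]
    rw [show (((cs.map String.ofList).length : Int) + 1 - 1).toNat = cs.length from by
      simp]
    apply List.map_congr_left
    intro j _
    simp only [Function.comp]
    rw [PySem.List.slice_to _ (by omega : (0:Int) ≤ 1 + (j:Int))]
    rw [show ((1:Int) + (j:Int)).toNat = j + 1 from by omega]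
    rfl
  have hB : build_hierarchy_path_alt clause tl spec
      = (if ((((pvDd cs cs.length).take 5).map (pvLabel tl spec)).reverse).isEmpty then clause
         else PySem.Str.join " > " ((((pvDd cs cs.length).take 5).map (pvLabel tl spec)).reverse)) := by
    rw [build_hierarchy_path_alt, hparts, hpref]
    rw [← pvDd_reverse cs cs.length (le_refl _)]
    rw [PySem.List.slice_from_neg_ofNat _ 5 (by omega)]
    rw [List.length_reverse, ← List.reverse_take]
    rw [List.map_reverse]
  rw [hA, hB, pvWalk_eq tl spec _ [] (by simp)]
  simp

-- ===== VERDICT (by name: the statement is the Claim_ definition above) =====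
theorem build_hierarchy_path_spec : Claim_equal_build_hierarchy_path := by
  intro clause tl spec _ _
  exact build_eq_general clause tl spec
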